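-- pv_equiv track=rewrite | github.com/yogeshrnaik/python | meta/uniform_integers/uniform_integers.py | getNextUniform
-- ===== SOURCE A (Python) =====
-- def isUniform(n: int) -> bool:
--     start = str(n)[0]
--     for c in str(n)[1:]:
--         if c != start:
--             return False
--
--     return True
--
-- def getNextUniform(n: int) -> int:
--     numStr = str(n)
--     length = len(numStr)
--     first = int(numStr[0])
--     newUniformStartsFromFirst = False
--     if not isUniform(n):
--         for c in numStr[1:]:
--             if int(c) < first:
--                 newUniformStartsFromFirst = True
--                 break
--             elif int(c) > first:
--                 break
--
--         if newUniformStartsFromFirst: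
--             return createUniform(first, length)
--
--     if first <= 8:
--         return createUniform(first + 1, length)
--     else:
--         return createUniform(1, length + 1)
--
-- def createUniform(first: int, length: int) -> int:
--     result = ""
--     for i in range(0, length):
--         result += str(first)
--     return int(result)
-- ===== SOURCE B (Python) =====
-- def getNextUniform(n: int) -> int:
--     # pure-arithmetic rewrite: repunit formula instead of digit-string scanning/building
--     L = 1
--     while 10 ** L <= n:
--         L += 1
--     f = n // 10 ** (L - 1)
--     rep = (10 ** L - 1) // 9
--     cand = f * rep
--     if cand > n:
--         return cand
--     if f <= 8:
--         return (f + 1) * rep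
--     return (10 ** (L + 1) - 1) // 9
-- ===== Notes on version B (the rewrite author's own statement) =====
-- stated objective: simpler
-- what changed: Replaces the digit-string scan (isUniform + first-differing-digit loop) and string-concatenation createUniform with pure integer arithmetic: the candidate uniform number is the first digit times the L-digit repunit, and one numeric comparison of the candidate with n picks the branch.
import Mathlib
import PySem

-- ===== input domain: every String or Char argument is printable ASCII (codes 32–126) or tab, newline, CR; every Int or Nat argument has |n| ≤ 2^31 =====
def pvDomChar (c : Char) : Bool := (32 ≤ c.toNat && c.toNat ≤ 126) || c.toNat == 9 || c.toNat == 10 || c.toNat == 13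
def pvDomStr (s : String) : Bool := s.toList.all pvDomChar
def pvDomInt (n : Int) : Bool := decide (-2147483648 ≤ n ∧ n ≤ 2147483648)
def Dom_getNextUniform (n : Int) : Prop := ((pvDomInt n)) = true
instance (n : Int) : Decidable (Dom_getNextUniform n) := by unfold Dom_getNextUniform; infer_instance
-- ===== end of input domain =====

-- B replaces A's digit-string scanning and string-built candidates with pure repunit arithmetic
-- (candidate = first digit times the repunit of equal length, one numeric comparison); objective: simpler.

-- ===== PORT A =====
-- for-loop of isUniform with its early 'return False'
def pvAllEq (start : Char) : List Char → Bool
  | [] => true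
  | c :: t => if c ≠ start then false else pvAllEq start t

def pvIsUniform (n : Int) : Bool :=
  let s := (PySem.Int.toStr n).toList
  let start := (PySem.List.pyGet? s 0).getD ' '   -- str(n) is never empty, so the default is unreachable
  pvAllEq start (PySem.List.slice s (some 1) none)

def pvCreateUniform (first length : Int) : Int :=
  let result : List Char :=
    (PySem.List.pyRange 0 length 1).foldl (fun acc _ => acc ++ (PySem.Int.toStr first).toList) []
  (PySem.Int.ofChars? result).getD 0   -- int("") never reached: length ≥ 1 at every call site inside Pre_

-- the find-first-differing-digit loop of getNextUniform, with its two 'break's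
def pvScan (first : Int) : List Char → Bool
  | [] => false
  | c :: t =>
    let d := (PySem.Int.ofChars? [c]).getD 0
    if d < first then true
    else if d > first then false
    else pvScan first t

def getNextUniform (n : Int) : Int :=
  let s := (PySem.Int.toStr n).toList
  let length : Int := (s.length : Int)
  let first : Int := (PySem.Int.ofChars? [(PySem.List.pyGet? s 0).getD ' ']).getD 0
  let cont : Int :=   -- the shared code after the early-return block
    if first ≤ 8 then pvCreateUniform (first + 1) length else pvCreateUniform 1 (length + 1)
  if !pvIsUniform n then
    if pvScan first (PySem.List.slice s (some 1) none) then pvCreateUniform first length else cont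
  else cont

-- ===== PORT B =====
-- while 10 ** L <= n: L += 1   (L : Nat since it counts up from 1 and is used as an exponent)
def pvLenLoop (n : Int) (L : Nat) : Nat :=
  if (10:Int) ^ L ≤ n then pvLenLoop n (L + 1) else L
termination_by n.toNat + 1 - L
decreasing_by
  have h1 : (L : Int) < 10 ^ L := by exact_mod_cast Nat.lt_pow_self (by norm_num) (n := L)
  omega

def getNextUniform_alt (n : Int) : Int :=
  let L : Nat := pvLenLoop n 1
  let f : Int := PySem.Int.floordiv n ((10:Int) ^ (L - 1))
  let rep : Int := PySem.Int.floordiv ((10:Int) ^ L - 1) 9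
  let cand : Int := f * rep
  if cand > n then cand
  else if f ≤ 8 then (f + 1) * rep
  else PySem.Int.floordiv ((10:Int) ^ (L + 1) - 1) 9

-- ===== PRECONDITION & SPEC =====
-- Python A raises ValueError on negative n (int('-') on the sign character); Pre_ excludes exactly those.
def Pre_getNextUniform (n : Int) : Prop := 0 ≤ n
instance (n : Int) : Decidable (Pre_getNextUniform n) := by unfold Pre_getNextUniform; infer_instance
def pvWitness_getNextUniform : Int := 42

def Spec_getNextUniform (n : Int) (out : Int) : Prop := out = getNextUniform_alt n
instance (n : Int) (out : Int) : Decidable (Spec_getNextUniform n out) := by unfold Spec_getNextUniform; infer_instance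

-- ===== CLAIM (what is proved, stated in full; the proofs are below) =====
def Claim_equal_getNextUniform : Prop := ∀ (n : Int), Dom_getNextUniform n → Pre_getNextUniform n → Spec_getNextUniform n (getNextUniform n)

-- ===== LEMMAS AND PROOFS =====

-- digit value of a digit character
def pvDv (c : Char) : Nat := c.toNat - 48
-- big-endian decimal value of a digit string
def pvVal (ds : List Char) : Nat := ds.foldl (fun a c => 10 * a + pvDv c) 0
-- the k-digit repunit 11…1
def pvRepu : Nat → Nat
  | 0 => 0
  | k + 1 => 10 * pvRepu k + 1

-- common arithmetic reference value both ports are reduced to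
def pvSpec (n : Int) : Int :=
  let L := (Nat.toDigits 10 n.toNat).length
  let f : Int := ((n.toNat / 10 ^ (L - 1) : Nat) : Int)
  let rep : Int := (pvRepu L : Int)
  if f * rep > n then f * rep
  else if f ≤ 8 then (f + 1) * rep
  else (pvRepu (L + 1) : Int)

theorem pvVal_foldl (t : List Char) (a : Nat) :
    t.foldl (fun a c => 10 * a + pvDv c) a = a * 10 ^ t.length + pvVal t := by
  induction t generalizing a with
  | nil => simp [pvVal]
  | cons c t ih =>
      have hv : pvVal (c :: t) = pvDv c * 10 ^ t.length + pvVal t := by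
        show List.foldl _ 0 (c :: t) = _
        simp only [List.foldl_cons]
        rw [ih]
        norm_num
      simp only [List.foldl_cons, List.length_cons]
      rw [ih, hv]
      ring

theorem pvVal_cons (c : Char) (t : List Char) :
    pvVal (c :: t) = pvDv c * 10 ^ t.length + pvVal t := by
  show List.foldl _ 0 (c :: t) = _
  simp only [List.foldl_cons]
  rw [pvVal_foldl]
  norm_num

theorem pvVal_append (xs : List Char) (c : Char) :
    pvVal (xs ++ [c]) = 10 * pvVal xs + pvDv c := by
  show List.foldl _ 0 (xs ++ [c]) = _
  rw [List.foldl_append]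
  simp [List.foldl_cons, pvVal]

def pvDigits : List Char := ['0','1','2','3','4','5','6','7','8','9']

theorem pvMem_toDigits (m : Nat) : ∀ c ∈ Nat.toDigits 10 m, c ∈ pvDigits := by
  induction m using Nat.strong_induction_on with
  | _ m ih =>
      intro c hc
      rw [Nat.toDigits_eq_if (by norm_num)] at hc
      by_cases hm : m < 10
      · simp only [if_pos hm, List.mem_singleton] at hc
        subst hc
        interval_cases m <;> decide
      · simp only [if_neg hm, List.mem_append, List.mem_singleton] at hc
        rcases hc with hc | hc
        · exact ih (m / 10) (by omega) c hc
        · subst hc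
          have h2 : m % 10 < 10 := Nat.mod_lt _ (by norm_num)
          interval_cases h : (m % 10) <;> decide

theorem pvDv_lt (c : Char) (h : c ∈ pvDigits) : pvDv c < 10 := by
  fin_cases h <;> decide

theorem pvOfChars_digit (c : Char) (h : c ∈ pvDigits) :
    PySem.Int.ofChars? [c] = some (pvDv c : Int) := by
  fin_cases h <;> decide

theorem pvVal_lt (ds : List Char) (h : ∀ c ∈ ds, c ∈ pvDigits) :
    pvVal ds < 10 ^ ds.length := by
  induction ds with
  | nil => simp [pvVal]
  | cons c t ih =>
      have h1 : pvDv c < 10 := pvDv_lt c (h c (by simp))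
      have h2 : pvVal t < 10 ^ t.length := ih (fun x hx => h x (by simp [hx]))
      have : pvDv c * 10 ^ t.length + pvVal t < (pvDv c + 1) * 10 ^ t.length := by
        rw [Nat.add_mul, Nat.one_mul]; omega
      calc pvVal (c :: t) = pvDv c * 10 ^ t.length + pvVal t := pvVal_cons c t
        _ < (pvDv c + 1) * 10 ^ t.length := this
        _ ≤ 10 * 10 ^ t.length := Nat.mul_le_mul_right _ (by omega)
        _ = 10 ^ (c :: t).length := by rw [List.length_cons]; ring

theorem pvVal_toDigits (m : Nat) : pvVal (Nat.toDigits 10 m) = m := by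
  induction m using Nat.strong_induction_on with
  | _ m ih =>
      rw [Nat.toDigits_eq_if (by norm_num)]
      by_cases hm : m < 10
      · simp only [if_pos hm]
        interval_cases m <;> decide
      · simp only [if_neg hm]
        rw [pvVal_append, ih (m / 10) (by omega)]
        have h2 : m % 10 < 10 := Nat.mod_lt _ (by norm_num)
        have h3 : pvDv (Nat.digitChar (m % 10)) = m % 10 := by
          interval_cases h : (m % 10) <;> decide
        omega

theorem pvRepu_mul (k : Nat) : 9 * pvRepu k + 1 = 10 ^ k := by
  induction k with
  | zero => decide
  | succ k ih => rw [pow_succ]; unfold pvRepu; omega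

theorem pvRepu_succ' (k : Nat) : pvRepu (k + 1) = 10 ^ k + pvRepu k := by
  have h1 := pvRepu_mul k
  have h2 : pvRepu (k + 1) = 10 * pvRepu k + 1 := rfl
  omega

theorem pvScan_iff (f : Nat) (t : List Char) (ht : ∀ c ∈ t, c ∈ pvDigits) (hf : f ≤ 9) :
    pvScan (f : Int) t = true ↔ pvVal t < f * pvRepu t.length := by
  induction t with
  | nil => simp [pvScan, pvVal, pvRepu]
  | cons c t ih =>
      have hc := ht c (by simp)
      have hd : pvDv c < 10 := pvDv_lt c hc
      have hof := pvOfChars_digit c hc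
      have ih' := ih (fun x hx => ht x (by simp [hx]))
      have hvP : pvVal t < 10 ^ t.length := pvVal_lt t (fun x hx => ht x (by simp [hx]))
      have hfr : 9 * pvRepu t.length + 1 = 10 ^ t.length := pvRepu_mul t.length
      have hrep : pvRepu (t.length + 1) = 10 ^ t.length + pvRepu t.length := pvRepu_succ' t.length
      have hcons : pvVal (c :: t) = pvDv c * 10 ^ t.length + pvVal t := pvVal_cons c t
      have hmul : f * (10 ^ t.length + pvRepu t.length) = f * 10 ^ t.length + f * pvRepu t.length :=
        Nat.mul_add f _ _
      have hfrlt : f * pvRepu t.length ≤ 9 * pvRepu t.length := Nat.mul_le_mul_right _ hf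
      simp only [pvScan, hof, Option.getD_some, List.length_cons, hcons, hrep, hmul]
      rcases lt_trichotomy (pvDv c) f with hlt | heq | hgt
      · have hlt' : ((pvDv c : Nat) : Int) < (f : Int) := by exact_mod_cast hlt
        simp only [if_pos hlt', true_iff]
        have e0 : (pvDv c + 1) * 10 ^ t.length = pvDv c * 10 ^ t.length + 10 ^ t.length := by ring
        have e1 : (pvDv c + 1) * 10 ^ t.length ≤ f * 10 ^ t.length :=
          Nat.mul_le_mul_right _ (by omega)
        omega
      · have h1 : ¬ (((pvDv c : Nat) : Int) < (f : Int)) := by exact_mod_cast not_lt.mpr heq.ge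
        have h2 : ¬ ((f : Int) < ((pvDv c : Nat) : Int)) := by exact_mod_cast not_lt.mpr heq.le
        simp only [if_neg h1, gt_iff_lt, if_neg h2]
        rw [ih']
        subst heq
        constructor <;> intro hh <;> omega
      · have hgt' : (f : Int) < ((pvDv c : Nat) : Int) := by exact_mod_cast hgt
        have h1 : ¬ (((pvDv c : Nat) : Int) < (f : Int)) := by omega
        simp only [if_neg h1, gt_iff_lt, if_pos hgt', Bool.false_eq_true, false_iff, not_lt]
        have e2 : f * pvRepu t.length < 10 ^ t.length := by omega
        have hle : f * 10 ^ t.length + f * pvRepu t.length ≤ pvDv c * 10 ^ t.length + pvVal t := by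
          have step : f * 10 ^ t.length + f * pvRepu t.length < (f + 1) * 10 ^ t.length := by
            have e0 : (f + 1) * 10 ^ t.length = f * 10 ^ t.length + 10 ^ t.length := by ring
            omega
          have e1 : (f + 1) * 10 ^ t.length ≤ pvDv c * 10 ^ t.length :=
            Nat.mul_le_mul_right _ (by omega)
          omega
        omega

theorem pvScan_const (s : Char) (hs : s ∈ pvDigits) (t : List Char) (h : ∀ c ∈ t, c = s) :
    pvScan ((pvDv s : Nat) : Int) t = false := by
  induction t with
  | nil => rfl
  | cons c t ih =>
      have hcs : c = s := h c (by simp)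
      subst hcs
      simp only [pvScan, pvOfChars_digit c hs, Option.getD_some, lt_self_iff_false, if_false]
      exact ih (fun x hx => h x (by simp [hx]))

theorem pvCreateUniform_val (d : Int) (L : Nat) (h1 : 1 ≤ d) (h2 : d ≤ 9)
    (h3 : 1 ≤ L) (h4 : L ≤ 11) : pvCreateUniform d (L : Int) = d * (pvRepu L : Int) := by
  interval_cases d <;> interval_cases L <;> decide

theorem pvLenLoop_eq (n : Int) (L : Nat) (hL : 1 ≤ L) (hub : n < 10 ^ L)
    (hlb : ∀ i, 1 ≤ i → i < L → (10:Int) ^ i ≤ n) :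
    ∀ j, 1 ≤ j → j ≤ L → pvLenLoop n j = L := by
  suffices h : ∀ k j, 1 ≤ j → j ≤ L → L - j ≤ k → pvLenLoop n j = L from
    fun j h1 h2 => h L j h1 h2 (by omega)
  intro k
  induction k with
  | zero =>
      intro j hj1 hj2 hj3
      have hjL : j = L := by omega
      subst hjL
      rw [pvLenLoop]
      simp [not_le.mpr hub]
  | succ k ih =>
      intro j hj1 hj2 hj3
      rw [pvLenLoop]
      by_cases hc : (10:Int) ^ j ≤ n
      · have hjL : j < L := by
          rcases lt_or_eq_of_le hj2 with h | h
          · exact h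
          · subst h; omega
        rw [if_pos hc]
        exact ih (j + 1) (by omega) (by omega) (by omega)
      · have hjL : j = L := by
          by_contra h'
          exact hc (hlb j hj1 (by omega))
        rw [if_neg hc, hjL]

theorem pvAllEq_true (s : Char) (t : List Char) (h : pvAllEq s t = true) : ∀ x ∈ t, x = s := by
  induction t with
  | nil => simp
  | cons c t ih =>
      intro x hx
      by_cases hcs : c = s
      · have h' : pvAllEq s t = true := by
          simpa [pvAllEq, hcs] using h
        rcases List.mem_cons.mp hx with h'' | h''
        · rw [h'', hcs]
        · exact ih h' x h''
      · have : pvAllEq s (c :: t) = false := by simp [pvAllEq, hcs]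
        rw [h] at this
        cases this

-- shared digit-structure facts for n.toNat
theorem pvDigitsFacts (n : Int) (h0 : 0 ≤ n) (h1 : n ≤ 2147483648) :
    ∃ c t, Nat.toDigits 10 n.toNat = c :: t ∧ c ∈ pvDigits ∧ (∀ x ∈ t, x ∈ pvDigits) ∧
      n.toNat = pvDv c * 10 ^ t.length + pvVal t ∧ pvVal t < 10 ^ t.length ∧
      t.length + 1 ≤ 10 ∧ n.toNat / 10 ^ t.length = pvDv c := by
  obtain ⟨c, t, hds⟩ : ∃ c t, Nat.toDigits 10 n.toNat = c :: t := by
    rcases hh : Nat.toDigits 10 n.toNat with _ | ⟨c, t⟩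
    · exact absurd (congrArg List.length hh) (by simpa using (Nat.length_toDigits_pos).ne')
    · exact ⟨c, t, rfl⟩
  have hcd : c ∈ pvDigits := pvMem_toDigits _ c (by rw [hds]; simp)
  have htd : ∀ x ∈ t, x ∈ pvDigits := fun x hx => pvMem_toDigits _ x (by rw [hds]; simp [hx])
  have hval : pvVal (c :: t) = n.toNat := by rw [← hds]; exact pvVal_toDigits _
  have hvc : n.toNat = pvDv c * 10 ^ t.length + pvVal t := by
    rw [← hval]; exact pvVal_cons c t
  have hvlt : pvVal t < 10 ^ t.length := pvVal_lt t htd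
  have hlen : t.length + 1 ≤ 10 := by
    have h10 : n.toNat < 10 ^ 10 := by omega
    have := (Nat.length_toDigits_le_iff (b := 10) (n := n.toNat) (k := 10)
      (by norm_num) (by norm_num)).mpr h10
    rw [hds] at this
    simpa using this
  have hdiv : n.toNat / 10 ^ t.length = pvDv c := by
    rw [hvc, Nat.mul_comm (pvDv c), Nat.mul_add_div (Nat.pow_pos (by norm_num)),
      Nat.div_eq_of_lt hvlt]
    omega
  exact ⟨c, t, hds, hcd, htd, hvc, hvlt, hlen, hdiv⟩

theorem pvA_eq (n : Int) (h0 : 0 ≤ n) (h1 : n ≤ 2147483648) : getNextUniform n = pvSpec n := by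
  obtain ⟨c, t, hds, hcd, htd, hvc, hvlt, hlen, hdiv⟩ := pvDigitsFacts n h0 h1
  have hn : ((n.toNat : Nat) : Int) = n := Int.toNat_of_nonneg h0
  have htoChars : (PySem.Int.toStr n).toList = c :: t := by
    rw [PySem.Int.toList_toStr, PySem.Int.toChars, if_neg (by omega), hds]
  have hf9 : pvDv c ≤ 9 := by have := pvDv_lt c hcd; omega
  have hfirst : (PySem.Int.ofChars? [c]).getD 0 = ((pvDv c : Nat) : Int) := by
    rw [pvOfChars_digit c hcd]; rfl
  have hrep : pvRepu (t.length + 1) = 10 ^ t.length + pvRepu t.length := pvRepu_succ' t.length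
  have hfr : 9 * pvRepu t.length + 1 = 10 ^ t.length := pvRepu_mul t.length
  have hmul : pvDv c * (10 ^ t.length + pvRepu t.length)
      = pvDv c * 10 ^ t.length + pvDv c * pvRepu t.length := Nat.mul_add _ _ _
  have hcond : (pvScan ((pvDv c : Nat) : Int) t = true)
      ↔ ((pvDv c : Nat) : Int) * ((pvRepu (t.length + 1) : Nat) : Int) > n := by
    rw [pvScan_iff _ _ htd hf9]
    rw [gt_iff_lt, ← hn]
    constructor
    · intro hh
      have : n.toNat < pvDv c * pvRepu (t.length + 1) := by rw [hrep, hmul]; omega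
      exact_mod_cast this
    · intro hh
      have : n.toNat < pvDv c * pvRepu (t.length + 1) := by exact_mod_cast hh
      rw [hrep, hmul] at this
      omega
  have hIsU : pvIsUniform n = pvAllEq c t := by
    unfold pvIsUniform
    rw [htoChars]
    simp [PySem.List.slice_from_one]
  have hUni : pvIsUniform n = true → pvScan ((pvDv c : Nat) : Int) t = false := by
    intro hu
    rw [hIsU] at hu
    exact pvScan_const c hcd t (pvAllEq_true c t hu)
  unfold getNextUniform pvSpec
  rw [htoChars, hds]
  simp only [List.length_cons, Nat.add_sub_cancel, PySem.List.pyGet?_zero_cons, Option.getD_some,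
    PySem.List.slice_from_one, List.tail_cons, hfirst, hdiv]
  cases hscan : pvScan ((pvDv c : Nat) : Int) t with
  | true =>
      have hisu : pvIsUniform n = false := by
        cases hpv : pvIsUniform n
        · rfl
        · rw [hUni hpv] at hscan; cases hscan
      have hcnd := hcond.mp hscan
      have hf1 : 1 ≤ pvDv c := by
        have hv := (pvScan_iff _ _ htd hf9).mp hscan
        rcases Nat.eq_zero_or_pos (pvDv c) with h | h
        · rw [h, Nat.zero_mul] at hv; omega
        · exact h
      rw [hisu]
      simp only [Bool.not_false, if_true]
      rw [if_pos hcnd]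
      exact pvCreateUniform_val ((pvDv c : Nat) : Int) (t.length + 1)
        (by exact_mod_cast hf1) (by exact_mod_cast hf9) (by omega) (by omega)
  | false =>
      have hcnd : ¬ (((pvDv c : Nat) : Int) * ((pvRepu (t.length + 1) : Nat) : Int) > n) := by
        intro hh
        rw [hcond.mpr hh] at hscan
        cases hscan
      rw [if_neg hcnd]
      have hsame : (if ((pvDv c : Nat) : Int) ≤ 8 then
          pvCreateUniform (((pvDv c : Nat) : Int) + 1) ((t.length + 1 : Nat) : Int)
        else pvCreateUniform 1 (((t.length + 1 : Nat) : Int) + 1))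
          = (if ((pvDv c : Nat) : Int) ≤ 8
            then (((pvDv c : Nat) : Int) + 1) * ((pvRepu (t.length + 1) : Nat) : Int)
            else ((pvRepu (t.length + 1 + 1) : Nat) : Int)) := by
        by_cases hf8 : ((pvDv c : Nat) : Int) ≤ 8
        · rw [if_pos hf8, if_pos hf8]
          have hc1 : (((pvDv c : Nat) : Int) + 1) = (((pvDv c + 1 : Nat)) : Int) := by push_cast; ring
          have hcu := pvCreateUniform_val (((pvDv c + 1 : Nat)) : Int) (t.length + 1)
            (by exact_mod_cast Nat.le_add_left 1 (pvDv c)) (by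
              have h8 : pvDv c ≤ 8 := by exact_mod_cast hf8
              exact_mod_cast Nat.succ_le_succ h8) (by omega) (by omega)
          rw [hc1, hcu]
        · rw [if_neg hf8, if_neg hf8]
          have hcu := pvCreateUniform_val 1 (t.length + 1 + 1) (by norm_num) (by norm_num)
            (by omega) (by omega)
          have hone : ((t.length + 1 : Nat) : Int) + 1 = ((t.length + 1 + 1 : Nat) : Int) := by
            push_cast; ring
          rw [hone, hcu, one_mul]
      cases hpv : pvIsUniform n with
      | false =>
          simp only [Bool.not_false, if_true, Bool.false_eq_true, if_false]
          exact hsame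
      | true =>
          simp only [Bool.not_true, Bool.false_eq_true, if_false]
          exact hsame

theorem pvB_eq (n : Int) (h0 : 0 ≤ n) (h1 : n ≤ 2147483648) : getNextUniform_alt n = pvSpec n := by
  obtain ⟨c, t, hds, hcd, htd, hvc, hvlt, hlen, hdiv⟩ := pvDigitsFacts n h0 h1
  have hn : ((n.toNat : Nat) : Int) = n := Int.toNat_of_nonneg h0
  have hLd : (Nat.toDigits 10 n.toNat).length = t.length + 1 := by rw [hds]; rfl
  have h' : n.toNat < 10 ^ (t.length + 1) := by
    have hd10 := pvDv_lt c hcd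
    have hb : pvDv c * 10 ^ t.length ≤ 9 * 10 ^ t.length := Nat.mul_le_mul_right _ (by omega)
    have hps : (10:Nat) ^ (t.length + 1) = 10 ^ t.length * 10 := pow_succ 10 t.length
    omega
  have hub : n < (10:Int) ^ (t.length + 1) := by
    rw [← hn]
    exact_mod_cast h'
  have hlb : ∀ i, 1 ≤ i → i < t.length + 1 → (10:Int) ^ i ≤ n := by
    intro i hi1 hi2
    have hge : 10 ^ t.length ≤ n.toNat := by
      rcases Nat.eq_zero_or_pos t.length with hz | hz
      · rw [hz]; omega
      · have hiff := Nat.length_toDigits_le_iff (b := 10) (n := n.toNat) (k := t.length)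
          (by norm_num) hz
        rw [hds] at hiff
        simp only [List.length_cons] at hiff
        by_contra hcon
        have : t.length + 1 ≤ t.length := hiff.mpr (by omega)
        omega
    have h10 : (10:Nat) ^ i ≤ 10 ^ t.length := Nat.pow_le_pow_right (by norm_num) (by omega)
    calc (10:Int) ^ i = (((10:Nat) ^ i : Nat) : Int) := by push_cast; ring
      _ ≤ ((n.toNat : Nat) : Int) := by exact_mod_cast le_trans h10 hge
      _ = n := hn
  have hloop : pvLenLoop n 1 = t.length + 1 :=
    pvLenLoop_eq n (t.length + 1) (by omega) hub hlb 1 (by omega) (by omega)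
  have hfd : PySem.Int.floordiv n ((10:Int) ^ (t.length + 1 - 1))
      = ((n.toNat / 10 ^ (t.length + 1 - 1) : Nat) : Int) := by
    have hpow : (10:Int) ^ (t.length + 1 - 1) = ((10 ^ (t.length + 1 - 1) : Nat) : Int) := by
      push_cast; ring
    rw [hpow, PySem.Int.floordiv_eq_ediv_of_pos (by positivity), ← hn]
    exact_mod_cast (Int.natCast_div _ _).symm
  have hrepL : PySem.Int.floordiv ((10:Int) ^ (t.length + 1) - 1) 9
      = ((pvRepu (t.length + 1) : Nat) : Int) := by
    have h9 : (10:Int) ^ (t.length + 1) - 1 = 9 * ((pvRepu (t.length + 1) : Nat) : Int) := by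
      have hh : ((9 * pvRepu (t.length + 1) + 1 : Nat) : Int) = ((10 ^ (t.length + 1) : Nat) : Int) := by
        exact_mod_cast pvRepu_mul (t.length + 1)
      push_cast at hh
      omega
    rw [h9, PySem.Int.floordiv_eq_ediv_of_pos (by norm_num),
      Int.mul_ediv_cancel_left _ (by norm_num)]
  have hrepL1 : PySem.Int.floordiv ((10:Int) ^ (t.length + 1 + 1) - 1) 9
      = ((pvRepu (t.length + 1 + 1) : Nat) : Int) := by
    have h9 : (10:Int) ^ (t.length + 1 + 1) - 1 = 9 * ((pvRepu (t.length + 1 + 1) : Nat) : Int) := by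
      have hh : ((9 * pvRepu (t.length + 1 + 1) + 1 : Nat) : Int)
          = ((10 ^ (t.length + 1 + 1) : Nat) : Int) := by
        exact_mod_cast pvRepu_mul (t.length + 1 + 1)
      push_cast at hh
      omega
    rw [h9, PySem.Int.floordiv_eq_ediv_of_pos (by norm_num),
      Int.mul_ediv_cancel_left _ (by norm_num)]
  simp only [getNextUniform_alt, pvSpec, hloop, hLd, hfd, hrepL, hrepL1]

-- ===== VERDICT (by name: the statement is the Claim_ definition above) =====
theorem getNextUniform_spec : Claim_equal_getNextUniform := by
  intro n hd hp
  have hd' : -2147483648 ≤ n ∧ n ≤ 2147483648 := by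
    simpa [Dom_getNextUniform, pvDomInt] using hd
  unfold Spec_getNextUniform
  rw [pvA_eq n hp hd'.2, pvB_eq n hp hd'.2]
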